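-- pv_equiv track=rewrite | github.com/helloteraslab/audiocut-feishu | scripts/build_feishu_transcript_doc.py | build_speaker_aliases
-- ===== SOURCE A (Python) =====
-- def build_speaker_aliases(turns):
--     aliases = {}
--     next_index = 0
--     for turn in turns:
--         speaker = turn["speaker"]
--         if speaker not in aliases:
--             aliases[speaker] = f"说话人 {chr(ord('A') + next_index)}"
--             next_index += 1
--     return aliases
-- ===== SOURCE B (Python) =====
-- def build_speaker_aliases(turns):
--     # Recursive "peel off the first speaker, filter out their later turns" decomposition:
--     # no seen-set or running counter is maintained at all.
--     def assign(speakers, idx):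
--         if not speakers:
--             return {}
--         head = speakers[0]
--         rest = [s for s in speakers[1:] if s != head]
--         result = {head: f"说话人 {chr(ord('A') + idx)}"}
--         result.update(assign(rest, idx + 1))
--         return result
--     return assign([turn["speaker"] for turn in turns], 0)
-- ===== Notes on version B (the rewrite author's own statement) =====
-- stated objective: alternative
-- what changed: A's single loop maintaining a seen-dict and running counter is replaced by a quicksort-style recursion: take the first speaker, label it by the recursion depth, filter all its later occurrences out, and recurse on the remainder; no membership structure or counter is kept.
import Mathlib
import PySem

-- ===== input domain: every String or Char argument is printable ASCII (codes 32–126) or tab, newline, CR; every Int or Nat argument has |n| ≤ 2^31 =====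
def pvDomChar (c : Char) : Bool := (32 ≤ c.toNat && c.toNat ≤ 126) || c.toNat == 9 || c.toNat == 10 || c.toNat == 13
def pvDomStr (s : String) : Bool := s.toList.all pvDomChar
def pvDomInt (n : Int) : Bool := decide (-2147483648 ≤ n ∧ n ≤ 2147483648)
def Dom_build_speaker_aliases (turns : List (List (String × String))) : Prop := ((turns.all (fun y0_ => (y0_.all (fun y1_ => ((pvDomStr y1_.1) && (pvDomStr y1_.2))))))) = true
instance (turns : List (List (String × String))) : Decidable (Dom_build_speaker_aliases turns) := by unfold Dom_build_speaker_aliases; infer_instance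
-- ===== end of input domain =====

-- B replaces A's seen-dict-plus-counter loop by a recursion that peels off the first speaker,
-- labels it by recursion depth, and filters its later occurrences out; same result, no speed claim.

-- f"说话人 {chr(ord('A') + n)}" — shared label helper (both Pythons use this exact expression)
def pvLabel (n : Int) : String := "说话人 " ++ String.singleton (Char.ofNat (65 + n).toNat)

-- ===== PORT A =====
-- one step of A's loop body; turn["speaker"] missing = KeyError, excluded by Pre_ (state kept unchanged here)
def pvStepA (st : PySem.Dict String String × Int) (turn : List (String × String)) :
    PySem.Dict String String × Int :=
  match (PySem.Dict.mk turn).get? "speaker" with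
  | none => st
  | some sp =>
    if (st.1.contains sp) then st
    else (st.1.insert sp (pvLabel st.2), st.2 + 1)

def build_speaker_aliases (turns : List (List (String × String))) : List (String × String) :=
  (turns.foldl pvStepA (PySem.Dict.empty, 0)).1.items

-- ===== PORT B =====
-- B's recursive helper 'assign': head gets the depth label, the tail is filtered of the head's
-- later occurrences and recursed on; result.update(assign(...)) appends the recursive items
-- after the head entry (its keys never contain head).
def pvAssign (speakers : List String) (idx : Int) : List (String × String) :=
  match speakers with
  | [] => []
  | h :: t => (h, pvLabel idx) :: pvAssign (t.filter (fun s => decide (s ≠ h))) (idx + 1)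
termination_by speakers.length
decreasing_by simpa using (List.length_filter_le _ _).trans (Nat.le_of_eq (List.length_attach))

-- turn["speaker"]: KeyError mapped to "" here, excluded by Pre_
def build_speaker_aliases_alt (turns : List (List (String × String))) : List (String × String) :=
  pvAssign (turns.map (fun t => ((PySem.Dict.mk t).get? "speaker").getD "")) 0

-- ===== PRECONDITION & SPEC =====
-- Pre_ excludes turns with no "speaker" key, on which A raises KeyError.
def Pre_build_speaker_aliases (turns : List (List (String × String))) : Prop :=
  ∀ t ∈ turns, (PySem.Dict.mk t).contains "speaker" = true
instance (turns : List (List (String × String))) : Decidable (Pre_build_speaker_aliases turns) := by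
  unfold Pre_build_speaker_aliases; infer_instance

def pvWitness_build_speaker_aliases : (List (List (String × String))) :=
  [[("speaker", "alice"), ("text", "hi")], [("speaker", "bob"), ("text", "yo")], [("speaker", "alice"), ("text", "ok")]]

def Spec_build_speaker_aliases (turns : List (List (String × String))) (out : List (String × String)) : Prop := out = build_speaker_aliases_alt turns
instance (turns : List (List (String × String))) (out : List (String × String)) : Decidable (Spec_build_speaker_aliases turns out) := by unfold Spec_build_speaker_aliases; infer_instance

-- ===== CLAIM (what is proved, stated in full; the proofs are below) =====
def Claim_equal_build_speaker_aliases : Prop := ∀ (turns : List (List (String × String))), Dom_build_speaker_aliases turns → Pre_build_speaker_aliases turns → Spec_build_speaker_aliases turns (build_speaker_aliases turns)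

-- ===== LEMMAS AND PROOFS =====

-- first-occurrence dedup written in B's filter-recursion style (proof-only helper)
def fdedup (l : List String) : List String :=
  match l with
  | [] => []
  | h :: t => h :: fdedup (t.filter (fun s => decide (s ≠ h)))
termination_by l.length
decreasing_by simpa using (List.length_filter_le _ _).trans (Nat.le_of_eq (List.length_attach))

theorem pvAssign_nil (idx : Int) : pvAssign [] idx = [] := by
  rw [pvAssign.eq_def]

theorem pvAssign_cons (h : String) (t : List String) (idx : Int) :
    pvAssign (h :: t) idx = (h, pvLabel idx) :: pvAssign (t.filter (fun s => decide (s ≠ h))) (idx + 1) := by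
  rw [pvAssign.eq_def]

theorem fdedup_nil : fdedup [] = [] := by
  rw [fdedup.eq_def]

theorem fdedup_cons (h : String) (t : List String) :
    fdedup (h :: t) = h :: fdedup (t.filter (fun s => decide (s ≠ h))) := by
  rw [fdedup.eq_def]

-- the labeled dict corresponding to a list of distinct speakers (proof-only)
def mkAliases (seen : List String) : PySem.Dict String String :=
  PySem.Dict.mk (seen.zipIdx.map (fun p => (p.1, pvLabel (p.2 : Int))))

theorem keys_mkAliases (seen : List String) : (mkAliases seen).keys = seen := by
  simp [mkAliases, PySem.Dict.keys, List.map_map, Function.comp_def]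

theorem foldA_inv (turns : List (List (String × String))) (seen : List String)
    (hnd : seen.Nodup)
    (hpre : ∀ t ∈ turns, (PySem.Dict.mk t).contains "speaker" = true) :
    turns.foldl pvStepA (mkAliases seen, (seen.length : Int)) =
      (mkAliases (PySem.Set.update seen
          (turns.map (fun t => ((PySem.Dict.mk t).get? "speaker").getD ""))),
       ((PySem.Set.update seen
          (turns.map (fun t => ((PySem.Dict.mk t).get? "speaker").getD ""))).length : Int)) := by
  induction turns generalizing seen with
  | nil => simp [PySem.Set.update_nil]
  | cons t ts ih =>
    have hc := hpre t (by simp)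
    have hsome : ((PySem.Dict.mk t).get? "speaker").isSome := by
      rw [← PySem.Dict.contains_eq_isSome_get?]; exact hc
    obtain ⟨sp, hsp⟩ := Option.isSome_iff_exists.mp hsome
    have hmem : (mkAliases seen).contains sp = decide (sp ∈ seen) := by
      rw [PySem.Dict.contains_eq_decide_mem_keys, keys_mkAliases]
    simp only [List.foldl_cons, List.map_cons, PySem.Set.update_cons]
    by_cases h : sp ∈ seen
    · have hstep : pvStepA (mkAliases seen, (seen.length : Int)) t = (mkAliases seen, (seen.length : Int)) := by
        simp [pvStepA, hsp, hmem, h]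
      rw [hstep, hsp]
      simp only [Option.getD_some]
      rw [PySem.Set.add_of_mem h]
      exact ih seen hnd (fun t ht => hpre t (by simp [ht]))
    · have hins : (mkAliases seen).insert sp (pvLabel (seen.length : Int)) = mkAliases (seen ++ [sp]) := by
        apply PySem.Dict.ext
        rw [PySem.Dict.items_insert_of_not_contains]
        · simp [mkAliases, List.zipIdx_append]
        · simp [hmem, h]
      have hstep : pvStepA (mkAliases seen, (seen.length : Int)) t =
          (mkAliases (seen ++ [sp]), ((seen ++ [sp]).length : Int)) := by
        simp [pvStepA, hsp, hmem, h, hins]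
      rw [hstep, hsp]
      simp only [Option.getD_some]
      rw [PySem.Set.add_of_not_mem h]
      exact ih (seen ++ [sp]) (by simp [List.nodup_append, hnd]; exact fun a ha he => h (he ▸ ha)) (fun t ht => hpre t (by simp [ht]))

-- Set.update in filter-recursion form
theorem update_eq_fdedup_filter (l acc : List String) :
    PySem.Set.update acc l = acc ++ fdedup (l.filter (fun s => decide (s ∉ acc))) := by
  induction l generalizing acc with
  | nil => simp [PySem.Set.update_nil, fdedup_nil]
  | cons h t ih =>
    rw [PySem.Set.update_cons]
    by_cases hm : h ∈ acc
    · rw [PySem.Set.add_of_mem hm, ih]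
      simp [hm]
    · rw [PySem.Set.add_of_not_mem hm, ih]
      have : t.filter (fun s => decide (s ∉ acc ++ [h])) =
          (t.filter (fun s => decide (s ∉ acc))).filter (fun s => decide (s ≠ h)) := by
        rw [List.filter_filter]
        apply List.filter_congr
        intro x _
        simp [and_comm]
      rw [this]
      simp only [List.filter_cons, hm, decide_true, not_false_iff, List.append_assoc,
        List.singleton_append]
      simp only [if_true]
      rw [fdedup_cons]

theorem update_nil_eq_fdedup (l : List String) : PySem.Set.update [] l = fdedup l := by
  rw [update_eq_fdedup_filter]
  simp

-- B's assign computes the zipIdx labeling of the fdedup of its input (fuel = length bound)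
theorem pvAssign_eq_zipIdx_aux (N : Nat) : ∀ (l : List String), l.length ≤ N → ∀ (n : Nat),
    pvAssign l (n : Int) = ((fdedup l).zipIdx n).map (fun p => (p.1, pvLabel (p.2 : Int))) := by
  induction N with
  | zero =>
    intro l hl n
    have : l = [] := List.eq_nil_of_length_eq_zero (Nat.le_zero.mp hl)
    subst this
    simp [pvAssign_nil, fdedup_nil]
  | succ N ih =>
    intro l hl n
    cases l with
    | nil => simp [pvAssign_nil, fdedup_nil]
    | cons h t =>
      have hlen : (t.filter (fun s => decide (s ≠ h))).length ≤ N := by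
        have := List.length_filter_le (fun s => decide (s ≠ h)) t
        simp at hl
        omega
      rw [pvAssign_cons, fdedup_cons]
      have hcast : ((n : Int) + 1) = ((n + 1 : Nat) : Int) := by push_cast; ring
      rw [hcast, ih _ hlen (n + 1)]
      simp [List.zipIdx_cons]

theorem pvAssign_eq_zipIdx (l : List String) (n : Nat) :
    pvAssign l (n : Int) = ((fdedup l).zipIdx n).map (fun p => (p.1, pvLabel (p.2 : Int))) :=
  pvAssign_eq_zipIdx_aux l.length l (Nat.le_refl _) n

-- ===== VERDICT (by name: the statement is the Claim_ definition above) =====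
theorem build_speaker_aliases_spec : Claim_equal_build_speaker_aliases := by
  intro turns _ hpre
  unfold Spec_build_speaker_aliases build_speaker_aliases build_speaker_aliases_alt
  have h0 : (PySem.Dict.empty, (0 : Int)) = (mkAliases [], (([] : List String).length : Int)) := by
    simp [mkAliases, PySem.Dict.empty]
  rw [h0, foldA_inv turns [] List.nodup_nil hpre]
  rw [update_nil_eq_fdedup]
  have := pvAssign_eq_zipIdx (turns.map (fun t => ((PySem.Dict.mk t).get? "speaker").getD "")) 0
  rw [Nat.cast_zero] at this
  rw [this]
  simp [mkAliases]
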